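-- pv_equiv track=rewrite | github.com/LeylaShojaei/Text2Vert | text2vert/converter.py | _split_word
-- ===== SOURCE A (Python) =====
-- import string
-- from typing import List
--
-- _PUNCTUATION_CHARS = string.punctuation
--
-- def _split_word(word: str) -> List[str]:
--     splits = []
--     last_cut_i = 0
--
--     for i, character in enumerate(word):
--         if character in _PUNCTUATION_CHARS:
--             splits.append(word[last_cut_i:i] + "\n")
--             splits.append(character + "\n")
--             last_cut_i = i + 1
--
--     if last_cut_i < len(word):
--         splits.append(word[last_cut_i:] + "\n")
--
--     return splits
-- ===== SOURCE B (Python) =====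
-- import re
-- import string
--
-- _PUNCTUATION_CHARS = string.punctuation
-- _SPLIT_RE = re.compile("([" + re.escape(string.punctuation) + "])")
--
-- def _split_word(word):
--     parts = _SPLIT_RE.split(word)
--     if parts and parts[-1] == "":
--         parts.pop()
--     return [p + "\n" for p in parts]
-- ===== Notes on version B (the rewrite author's own statement) =====
-- stated objective: idiomatic
-- what changed: Replaces A's manual enumerate loop with index bookkeeping and slicing by a single re.split on a punctuation character class with captured delimiters, popping the one trailing empty piece and appending newlines in a comprehension.
import Mathlib
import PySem

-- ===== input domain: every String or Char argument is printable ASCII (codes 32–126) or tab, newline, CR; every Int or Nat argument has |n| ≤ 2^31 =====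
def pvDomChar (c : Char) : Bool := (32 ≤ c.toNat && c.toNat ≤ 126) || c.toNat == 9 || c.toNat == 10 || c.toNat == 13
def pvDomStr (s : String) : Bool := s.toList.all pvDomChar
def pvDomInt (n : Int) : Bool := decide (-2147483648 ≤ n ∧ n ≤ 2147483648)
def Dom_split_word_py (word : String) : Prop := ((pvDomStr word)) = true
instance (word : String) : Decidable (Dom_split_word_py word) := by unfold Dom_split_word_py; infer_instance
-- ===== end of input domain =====

-- B replaces A's manual index-tracking loop by a regex split on punctuation with captured
-- delimiters (one trailing empty piece popped), which is the idiomatic Python for this task.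

-- string.punctuation (module constant _PUNCTUATION_CHARS), shared by both ports
def pvPunct : List Char := "!\"#$%&'()*+,-./:;<=>?@[\\]^_`{|}~".toList

-- ===== PORT A =====
-- transliteration of A's enumerate loop: state = (splits, last_cut_i), slices via PySem
def split_word_py (word : String) : List String :=
  let cs := word.toList
  let st := (PySem.List.enumerate cs 0).foldl
    (fun (st : List String × Int) (p : Int × Char) =>
      if p.2 ∈ pvPunct then
        (st.1 ++ [String.mk (PySem.List.slice cs (some st.2) (some p.1) ++ ['\n']),
                  String.mk [p.2, '\n']], p.1 + 1)
      else st) ([], 0)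
  if st.2 < (cs.length : Int) then
    st.1 ++ [String.mk (PySem.List.slice cs (some st.2) none ++ ['\n'])]
  else st.1

-- ===== PORT B =====
-- hand port of re.split("([<punct>])", word): PySem has no regex; for a single-character
-- capturing class this recursion is exact — alternating segments and captured delimiters,
-- with a final (possibly empty) trailing segment.
def pvReSplitCap : List Char → List (List Char)
  | [] => [[]]
  | c :: rest =>
    if c ∈ pvPunct then [] :: [c] :: pvReSplitCap rest
    else
      match pvReSplitCap rest with
      | s :: ss => (c :: s) :: ss
      | [] => [[c]]   -- unreachable: pvReSplitCap never returns []

def split_word_py_alt (word : String) : List String :=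
  let parts := pvReSplitCap word.toList
  let parts := if parts ≠ [] ∧ parts.getLast? = some [] then parts.dropLast else parts
  parts.map (fun p => String.mk (p ++ ['\n']))

-- ===== PRECONDITION & SPEC =====
def Spec_split_word_py (word : String) (out : List String) : Prop := out = split_word_py_alt word
instance (word : String) (out : List String) : Decidable (Spec_split_word_py word out) := by unfold Spec_split_word_py; infer_instance

-- ===== CLAIM (what is proved, stated in full; the proofs are below) =====
def Claim_equal_split_word_py : Prop := ∀ (word : String), Dom_split_word_py word → Spec_split_word_py word (split_word_py word)

-- ===== LEMMAS AND PROOFS =====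

-- reference recursion: g pend cs = remaining tokens when `pend` is the pending segment
def pvG (pend : List Char) : List Char → List (List Char)
  | [] => if pend = [] then [] else [pend]
  | c :: rest => if c ∈ pvPunct then pend :: [c] :: pvG [] rest else pvG (pend ++ [c]) rest

theorem pvReSplitCap_ne_nil (cs : List Char) : pvReSplitCap cs ≠ [] := by
  cases cs with
  | nil => simp [pvReSplitCap]
  | cons c rest =>
    simp only [pvReSplitCap]
    split
    · simp
    · cases h : pvReSplitCap rest <;> simp

def pvDropTrail (P : List (List Char)) : List (List Char) :=
  if P.getLast? = some [] then P.dropLast else P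

theorem pvDropTrail_cons_cons (a b s : List Char) (ss : List (List Char)) :
    pvDropTrail (a :: b :: s :: ss) = a :: b :: pvDropTrail (s :: ss) := by
  unfold pvDropTrail
  rw [List.getLast?_cons_cons, List.getLast?_cons_cons]
  split <;> simp [List.dropLast]

theorem pvG_eq_dropTrail (cs : List Char) : ∀ pend,
    pvG pend cs = pvDropTrail (match pvReSplitCap cs with
      | s :: ss => (pend ++ s) :: ss
      | [] => [pend]) := by
  induction cs with
  | nil =>
    intro pend
    by_cases h : pend = [] <;> simp [pvG, pvReSplitCap, pvDropTrail, h]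
  | cons c rest ih =>
    intro pend
    by_cases hc : c ∈ pvPunct
    · have hne := pvReSplitCap_ne_nil rest
      obtain ⟨s, ss, hs⟩ := List.exists_cons_of_ne_nil hne
      simp only [pvG, pvReSplitCap, hc, if_pos, if_true, hs]
      rw [ih []]
      simp only [hs, List.nil_append]
      rw [pvDropTrail_cons_cons]
      simp
    · have hne := pvReSplitCap_ne_nil rest
      obtain ⟨s, ss, hs⟩ := List.exists_cons_of_ne_nil hne
      simp only [pvG, pvReSplitCap, hc, if_false, hs, if_neg]
      rw [ih (pend ++ [c])]
      simp [hs, List.append_assoc]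

-- A's loop step and finalization, named for the invariant
def pvStepA (cs : List Char) (st : List String × Int) (p : Int × Char) : List String × Int :=
  if p.2 ∈ pvPunct then
    (st.1 ++ [String.mk (PySem.List.slice cs (some st.2) (some p.1) ++ ['\n']),
              String.mk [p.2, '\n']], p.1 + 1)
  else st

def pvFinA (cs : List Char) (st : List String × Int) : List String :=
  if st.2 < (cs.length : Int) then
    st.1 ++ [String.mk (PySem.List.slice cs (some st.2) none ++ ['\n'])]
  else st.1

def pvOut (p : List Char) : String := String.mk (p ++ ['\n'])

theorem pvA_invariant (cs : List Char) : ∀ (suf : List Char) (n m : Nat) (acc : List String),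
    m ≤ n → suf = cs.drop n →
    pvFinA cs ((PySem.List.enumerate suf (n : Int)).foldl (pvStepA cs) (acc, (m : Int)))
      = acc ++ (pvG ((cs.drop m).take (n - m)) suf).map pvOut := by
  intro suf
  induction suf with
  | nil =>
    intro n m acc hmn hsuf
    have hn : cs.length ≤ n := by
      by_contra h
      push_neg at h
      have := List.drop_eq_nil_iff.mp hsuf.symm
      omega
    have hdrop : (cs.drop m).take (n - m) = cs.drop m := by
      apply List.take_of_length_le
      simp
      omega
    simp only [PySem.List.enumerate_nil, List.foldl_nil, pvFinA, pvG, hdrop]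
    rw [PySem.List.slice_from_natCast]
    by_cases hm : m < cs.length
    · have h1 : (m : Int) < (cs.length : Int) := by exact_mod_cast hm
      have h2 : cs.drop m ≠ [] := by
        simp [List.drop_eq_nil_iff]
        omega
      simp [h1, h2, pvOut]
    · have h1 : ¬ ((m : Int) < (cs.length : Int)) := by exact_mod_cast hm
      have h2 : cs.drop m = [] := by
        simp [List.drop_eq_nil_iff]
        omega
      simp [h1, h2]
  | cons c rest ih =>
    intro n m acc hmn hsuf
    have hn : n < cs.length := by
      by_contra h
      push_neg at h
      rw [List.drop_eq_nil_of_le h] at hsuf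
      simp at hsuf
    have hcn : cs[n]? = some c := by
      have := hsuf
      rw [List.drop_eq_getElem_cons hn] at this
      simp only [List.cons.injEq] at this
      rw [List.getElem?_eq_getElem hn, this.1]
    have hrest : rest = cs.drop (n + 1) := by
      have := hsuf
      rw [List.drop_eq_getElem_cons hn] at this
      exact (List.cons.injEq _ _ _ _ ▸ this).2
    rw [PySem.List.enumerate_cons, List.foldl_cons]
    by_cases hc : c ∈ pvPunct
    · have hstep : pvStepA cs (acc, (m : Int)) ((n : Int), c)
          = (acc ++ [pvOut ((cs.drop m).take (n - m)), pvOut [c]], ((n + 1 : Nat) : Int)) := by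
        simp only [pvStepA, hc, if_pos]
        rw [PySem.List.slice_natCast]
        push_cast
        simp [pvOut]
      rw [hstep]
      have h1 : ((n : Int) + 1) = ((n + 1 : Nat) : Int) := by push_cast; ring
      rw [h1, ih (n + 1) (n + 1) _ (le_refl _) hrest]
      simp [pvG, hc]
    · have hstep : pvStepA cs (acc, (m : Int)) ((n : Int), c) = (acc, (m : Int)) := by
        simp [pvStepA, hc]
      rw [hstep]
      have h1 : ((n : Int) + 1) = ((n + 1 : Nat) : Int) := by push_cast; ring
      rw [h1, ih (n + 1) m acc (by omega) hrest]
      have htake : (cs.drop m).take (n + 1 - m) = (cs.drop m).take (n - m) ++ [c] := by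
        have hidx : (cs.drop m)[n - m]? = some c := by
          rw [List.getElem?_drop]
          rw [show m + (n - m) = n by omega]
          exact hcn
        have : n + 1 - m = (n - m) + 1 := by omega
        rw [this, List.take_succ, hidx]
        simp
      rw [htake]
      simp [pvG, hc]

theorem pvB_eq (word : String) :
    split_word_py_alt word = (pvG [] word.toList).map pvOut := by
  have hne := pvReSplitCap_ne_nil word.toList
  obtain ⟨s, ss, hs⟩ := List.exists_cons_of_ne_nil hne
  rw [split_word_py_alt, pvG_eq_dropTrail, hs]
  have hfun : (fun p : List Char => String.mk (p ++ ['\n'])) = pvOut := rfl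
  simp only [List.nil_append, pvDropTrail, hfun]
  by_cases h : (s :: ss).getLast? = some []
  · simp [hs, h, pvOut]
  · simp [hs, h, pvOut]

-- ===== VERDICT (by name: the statement is the Claim_ definition above) =====
theorem split_word_py_spec : Claim_equal_split_word_py := by
  intro word _
  unfold Spec_split_word_py
  rw [pvB_eq]
  have h := pvA_invariant word.toList word.toList 0 0 [] (le_refl 0) (by simp)
  simpa [split_word_py, pvStepA, pvFinA] using h
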